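-- pv_equiv track=rewrite | github.com/hutanmihai/FMI | Anul II/Semestrul I/AlgoritmiFundamentali/Laborator/PregatireColocviu/Clustering.py | getSortedEdges
-- ===== SOURCE A (Python) =====
-- def Levenshtein(word1, word2):
--     if len(word2) == 0:
--         return len(word1)
--     elif len(word1) == 0:
--         return len(word2)
--     elif word1[0] == word2[0]:
--         return Levenshtein(word1[1:], word2[1:])
--     else:
--         return 1 + min(Levenshtein(word1, word2[1:]), Levenshtein(word1[1:], word2), Levenshtein(word1[1:], word2[1:]))
--
-- def getSortedEdges(words):
--     lista = []
--
--     for i in range(len(words) - 1):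
--         for j in range(i + 1, len(words)):
--             dist = Levenshtein(words[i], words[j])
--             lista.append((i, j, dist))
--
--     lista.sort(key = lambda e: e[2])
--     return lista
-- ===== SOURCE B (Python) =====
-- def _edit(a, b):
--     # suffix DP: row[j] = edit distance between the processed suffix of a and b[j:]
--     m = len(b)
--     row = list(range(m, -1, -1))
--     for c in reversed(a):
--         new = [0] * (m + 1)
--         new[m] = row[m] + 1
--         for j in range(m - 1, -1, -1):
--             new[j] = min(row[j] + 1, new[j + 1] + 1, row[j + 1] + (0 if c == b[j] else 1))
--         row = new
--     return row[0]
--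
-- def getSortedEdges(words):
--     n = len(words)
--     return sorted(((i, j, _edit(words[i], words[j]))
--                    for i in range(n) for j in range(i + 1, n)),
--                   key=lambda e: e[2])
-- ===== Notes on version B (the rewrite author's own statement) =====
-- stated objective: faster
-- what changed: Replaces the exponential 3-way recursive Levenshtein with an iterative Wagner-Fischer suffix DP (two rows), and builds the edge list as one sorted comprehension instead of nested appends plus in-place sort.
import Mathlib
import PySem

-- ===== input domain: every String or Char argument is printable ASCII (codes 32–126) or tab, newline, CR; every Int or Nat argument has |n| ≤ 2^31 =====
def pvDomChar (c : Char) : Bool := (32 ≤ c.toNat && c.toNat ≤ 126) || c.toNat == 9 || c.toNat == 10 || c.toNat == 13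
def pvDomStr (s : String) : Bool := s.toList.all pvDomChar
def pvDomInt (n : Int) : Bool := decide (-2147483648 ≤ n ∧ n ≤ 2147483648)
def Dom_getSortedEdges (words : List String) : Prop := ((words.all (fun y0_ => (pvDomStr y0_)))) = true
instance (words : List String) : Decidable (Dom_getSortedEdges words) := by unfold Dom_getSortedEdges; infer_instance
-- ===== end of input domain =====

-- B replaces A's exponential 3-way recursive Levenshtein by an iterative Wagner-Fischer
-- suffix-DP over rows, and builds the edge list as one sorted comprehension instead of
-- nested appends plus an in-place sort (objective: faster). Return values agree on all
-- inputs; A's in-place sort of a list local to A is not observable by the caller.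

-- ===== PORT A =====
-- port helper lemmas cited by LevA's decreasing_by (word[1:] on the toList side; proof
-- terms kept tiny and omega-free on purpose)
theorem pvSlice1_toList (s : String) :
    (PySem.Str.slice s (some 1) none).toList = s.toList.tail := by
  simp [PySem.Str.slice, PySem.List.slice_from_one]

theorem pvLenPos (w : String) (h : ¬ PySem.Str.len w = 0) : 0 < w.toList.length :=
  Nat.pos_of_ne_zero (fun e => h (by rw [PySem.Str.len_eq, e]; rfl))

theorem pvTailLen (w : String) :
    (PySem.Str.slice w (some 1) none).toList.length = w.toList.length - 1 := by
  rw [pvSlice1_toList, List.length_tail]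

theorem pvDecBoth (w1 w2 : String) (h2 : ¬ PySem.Str.len w2 = 0) (h1 : ¬ PySem.Str.len w1 = 0) :
    (PySem.Str.slice w1 (some 1) none).toList.length + (PySem.Str.slice w2 (some 1) none).toList.length
      < w1.toList.length + w2.toList.length := by
  rw [pvTailLen, pvTailLen]
  exact Nat.add_lt_add (Nat.sub_lt (pvLenPos _ h1) Nat.one_pos)
    (Nat.sub_lt (pvLenPos _ h2) Nat.one_pos)

theorem pvDecRight (w1 w2 : String) (h2 : ¬ PySem.Str.len w2 = 0) :
    w1.toList.length + (PySem.Str.slice w2 (some 1) none).toList.length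
      < w1.toList.length + w2.toList.length := by
  rw [pvTailLen]
  exact Nat.add_lt_add_left (Nat.sub_lt (pvLenPos _ h2) Nat.one_pos) _

theorem pvDecLeft (w1 w2 : String) (h1 : ¬ PySem.Str.len w1 = 0) :
    (PySem.Str.slice w1 (some 1) none).toList.length + w2.toList.length
      < w1.toList.length + w2.toList.length := by
  rw [pvTailLen]
  exact Nat.add_lt_add_right (Nat.sub_lt (pvLenPos _ h1) Nat.one_pos) _

def LevA (word1 word2 : String) : Int :=
  if PySem.Str.len word2 = 0 then PySem.Str.len word1
  else if PySem.Str.len word1 = 0 then PySem.Str.len word2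
  else if PySem.Str.pyGet? word1 0 = PySem.Str.pyGet? word2 0 then
    LevA (PySem.Str.slice word1 (some 1) none) (PySem.Str.slice word2 (some 1) none)
  else 1 + min (LevA word1 (PySem.Str.slice word2 (some 1) none))
           (min (LevA (PySem.Str.slice word1 (some 1) none) word2)
                (LevA (PySem.Str.slice word1 (some 1) none) (PySem.Str.slice word2 (some 1) none)))
termination_by word1.toList.length + word2.toList.length
decreasing_by
  · exact pvDecBoth _ _ ‹_› ‹_›
  · exact pvDecRight _ _ ‹_›
  · exact pvDecLeft _ _ ‹_›
  · exact pvDecBoth _ _ ‹_› ‹_›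

def getSortedEdges (words : List String) : List (Int × Int × Int) :=
  let lista : List (Int × Int × Int) :=
    (PySem.List.pyRange 0 ((words.length : Int) - 1)).foldl (fun acc i =>
      (PySem.List.pyRange (i + 1) (words.length : Int)).foldl (fun acc j =>
        acc ++ [(i, j, LevA (PySem.List.pyGetD words i "") (PySem.List.pyGetD words j ""))]) acc) []
  PySem.List.sorted lista (fun e => e.2.2) false

-- ===== PORT B =====
-- Source B's inner loop 'for j in range(m-1, -1, -1)' filling new[j] from row[j], new[j+1] and
-- row[j+1], written as the obvious structural recursion on the suffix b[j:] of b paired with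
-- the suffix row[j:] of the previous row (same reads, same min, right-to-left order)
def stepB (c : Char) : List Char → List Int → List Int
  | [], prev => [prev.headD 0 + 1]
  | y :: bs, prev =>
      let cur := stepB c bs prev.tail
      min (prev.headD 0 + 1)
        (min (cur.headD 0 + 1) (prev.tail.headD 0 + (if c = y then 0 else 1))) :: cur

def editB (a b : String) : Int :=
  let bl := b.toList
  let m : Int := (bl.length : Int)
  let row0 := PySem.List.pyRange m (-1) (-1)          -- row = list(range(m, -1, -1))
  (a.toList.reverse.foldl (fun row c => stepB c bl row) row0).headD 0   -- for c in reversed(a)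

def getSortedEdges_alt (words : List String) : List (Int × Int × Int) :=
  let n : Int := (words.length : Int)
  PySem.List.sorted
    ((PySem.List.pyRange 0 n).flatMap (fun i =>
      (PySem.List.pyRange (i + 1) n).map (fun j =>
        (i, j, editB (PySem.List.pyGetD words i "") (PySem.List.pyGetD words j "")))))
    (fun e => e.2.2) false

-- ===== PRECONDITION & SPEC =====
def Spec_getSortedEdges (words : List String) (out : List (Int × Int × Int)) : Prop := out = getSortedEdges_alt words
instance (words : List String) (out : List (Int × Int × Int)) : Decidable (Spec_getSortedEdges words out) := by unfold Spec_getSortedEdges; infer_instance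

-- ===== CLAIM (what is proved, stated in full; the proofs are below) =====
def Claim_equal_getSortedEdges : Prop := ∀ (words : List String), Dom_getSortedEdges words → Spec_getSortedEdges words (getSortedEdges words)

-- ===== LEMMAS AND PROOFS =====

-- A's Levenshtein recursion, moved to the List Char side
def levAL : List Char → List Char → Int
  | a, [] => (a.length : Int)
  | [], _ :: b' => ((b'.length : Int) + 1)
  | x :: a', y :: b' =>
      if x = y then levAL a' b'
      else 1 + min (levAL (x :: a') b') (min (levAL a' (y :: b')) (levAL a' b'))
termination_by a b => a.length + b.length

theorem levAL_nil_left (b : List Char) : levAL [] b = (b.length : Int) := by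
  cases b <;> simp [levAL]

-- adding one character on either side changes levAL by at most 1
theorem levAL_bounds :
    ∀ (n : Nat) (a b : List Char) (c : Char), a.length + b.length ≤ n →
      (levAL (c :: a) b ≤ levAL a b + 1 ∧ levAL a b ≤ levAL (c :: a) b + 1 ∧
       levAL a (c :: b) ≤ levAL a b + 1 ∧ levAL a b ≤ levAL a (c :: b) + 1) := by
  intro n
  induction n with
  | zero =>
      intro a b c h
      have ha : a = [] := by cases a <;> simp at h ⊢
      have hb : b = [] := by cases b <;> simp at h ⊢
      subst ha; subst hb
      refine ⟨?_, ?_, ?_, ?_⟩ <;> simp [levAL]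
  | succ n ih =>
      intro a b c h
      refine ⟨?_, ?_, ?_, ?_⟩
      · -- insert in front of a cannot lower by more than 1
        cases b with
        | nil => simp [levAL]
        | cons y b' =>
          by_cases hcy : c = y
          · subst hcy
            have h4 := (ih a b' c (by simp at h; omega)).2.2.2
            simp only [levAL]; simp only [if_true]
            omega
          · have h1 : min (levAL (c :: a) b') (min (levAL a (y :: b')) (levAL a b'))
                ≤ levAL a (y :: b') := le_trans (min_le_right _ _) (min_le_left _ _)
            simp only [levAL, if_neg hcy]
            omega
      · -- insert in front of a cannot raise by more than 1
        cases b with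
        | nil => simp [levAL]; omega
        | cons y b' =>
          by_cases hcy : c = y
          · subst hcy
            have h3 := (ih a b' c (by simp at h; omega)).2.2.1
            simp only [levAL]; simp only [if_true]
            omega
          · have f1 := (ih a b' c (by simp at h; omega)).2.1
            have f2 := (ih a b' y (by simp at h; omega)).2.2.1
            simp only [levAL, if_neg hcy]
            omega
      · -- insert in front of b cannot lower by more than 1
        cases a with
        | nil => simp [levAL_nil_left]
        | cons x a' =>
          by_cases hxc : x = c
          · subst hxc
            have h2 := (ih a' b x (by simp at h; omega)).2.1
            simp only [levAL]; simp only [if_true]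
            omega
          · have h1 : min (levAL (x :: a') b) (min (levAL a' (c :: b)) (levAL a' b))
                ≤ levAL (x :: a') b := min_le_left _ _
            simp only [levAL, if_neg hxc]
            omega
      · -- insert in front of b cannot raise by more than 1
        cases a with
        | nil => simp [levAL_nil_left]; omega
        | cons x a' =>
          by_cases hxc : x = c
          · subst hxc
            have h1 := (ih a' b x (by simp at h; omega)).1
            simp only [levAL]; simp only [if_true]
            omega
          · have g1 := (ih a' b x (by simp at h; omega)).1
            have g2 := (ih a' b c (by simp at h; omega)).2.2.2
            simp only [levAL, if_neg hxc]
            omega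

-- the uniform (full-min) recurrence that the DP transition uses, valid also on matches
theorem levAL_cons_cons (x y : Char) (a b : List Char) :
    levAL (x :: a) (y :: b) =
      min (levAL a (y :: b) + 1)
        (min (levAL (x :: a) b + 1) (levAL a b + (if x = y then 0 else 1))) := by
  by_cases hxy : x = y
  · subst hxy
    have h2 := (levAL_bounds (a.length + b.length) a b x le_rfl).2.1
    have h4 := (levAL_bounds (a.length + b.length) a b x le_rfl).2.2.2
    simp only [levAL]; simp only [if_true]
    omega
  · simp only [levAL, if_neg hxy]
    omega

-- bridge: port A equals levAL on toList
theorem levA_eq_aux :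
    ∀ (n : Nat) (w1 w2 : String), w1.toList.length + w2.toList.length ≤ n →
      LevA w1 w2 = levAL w1.toList w2.toList := by
  intro n
  induction n with
  | zero =>
      intro w1 w2 h
      have h2 : w2.toList = [] := by
        cases e : w2.toList <;> simp [e] at h ⊢
      rw [LevA, if_pos (by simp [PySem.Str.len_eq, h2])]
      simp [PySem.Str.len_eq, h2, levAL]
  | succ n ih =>
      intro w1 w2 h
      rw [LevA]
      have e1 : PySem.Str.pyGet? w1 0 = w1.toList[0]? := by
        exact_mod_cast PySem.Str.pyGet?_natCast w1 0
      have e2 : PySem.Str.pyGet? w2 0 = w2.toList[0]? := by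
        exact_mod_cast PySem.Str.pyGet?_natCast w2 0
      split_ifs with hb ha hm
      · have h2 : w2.toList = [] := by
          simpa [PySem.Str.len_eq, Nat.cast_eq_zero, List.length_eq_zero_iff] using hb
        simp [PySem.Str.len_eq, h2, levAL]
      · have h1 : w1.toList = [] := by
          simpa [PySem.Str.len_eq, Nat.cast_eq_zero, List.length_eq_zero_iff] using ha
        simp [PySem.Str.len_eq, h1, levAL_nil_left]
      · obtain ⟨y, b', hb'⟩ : ∃ y b', w2.toList = y :: b' := by
          cases e : w2.toList
          · exact absurd (by simp [PySem.Str.len_eq, e]) hb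
          · exact ⟨_, _, rfl⟩
        obtain ⟨x, a', ha'⟩ : ∃ x a', w1.toList = x :: a' := by
          cases e : w1.toList
          · exact absurd (by simp [PySem.Str.len_eq, e]) ha
          · exact ⟨_, _, rfl⟩
        have hxy : x = y := by
          rw [e1, e2, ha', hb'] at hm
          simpa using hm
        rw [ih _ _ (by simp [PySem.List.slice_from_one, ha', hb'] at h ⊢; omega)]
        rw [pvSlice1_toList, pvSlice1_toList, ha', hb', List.tail_cons, List.tail_cons,
          hxy]
        simp [levAL]
      · obtain ⟨y, b', hb'⟩ : ∃ y b', w2.toList = y :: b' := by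
          cases e : w2.toList
          · exact absurd (by simp [PySem.Str.len_eq, e]) hb
          · exact ⟨_, _, rfl⟩
        obtain ⟨x, a', ha'⟩ : ∃ x a', w1.toList = x :: a' := by
          cases e : w1.toList
          · exact absurd (by simp [PySem.Str.len_eq, e]) ha
          · exact ⟨_, _, rfl⟩
        have hxy : x ≠ y := by
          rw [e1, e2, ha', hb'] at hm
          simpa using hm
        rw [ih _ _ (by simp [PySem.List.slice_from_one, ha', hb'] at h ⊢; omega),
            ih _ _ (by simp [PySem.List.slice_from_one, ha', hb'] at h ⊢; omega),
            ih _ _ (by simp [PySem.List.slice_from_one, ha', hb'] at h ⊢; omega)]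
        rw [pvSlice1_toList, pvSlice1_toList, ha', hb', List.tail_cons, List.tail_cons]
        simp [levAL, hxy]

theorem levA_eq (w1 w2 : String) : LevA w1 w2 = levAL w1.toList w2.toList :=
  levA_eq_aux _ w1 w2 le_rfl

-- the row of suffix distances: rowSpec a b = [levAL a b[j:] for j = 0..len b]
def rowSpec (a : List Char) : List Char → List Int
  | [] => [levAL a []]
  | y :: b' => levAL a (y :: b') :: rowSpec a b'

theorem headD_rowSpec (a b : List Char) : (rowSpec a b).headD 0 = levAL a b := by
  cases b <;> rfl

theorem stepB_rowSpec (c : Char) (a b : List Char) :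
    stepB c b (rowSpec a b) = rowSpec (c :: a) b := by
  induction b with
  | nil =>
      simp [stepB, rowSpec, levAL]
  | cons y b' ih =>
      simp only [stepB, rowSpec, List.tail_cons, List.headD_cons, ih, headD_rowSpec,
        levAL_cons_cons c y a b']

theorem rowSpec_nil (b : List Char) :
    rowSpec [] b = (List.range (b.length + 1)).map (fun k : Nat => ((b.length : Int) - (k : Int))) := by
  induction b with
  | nil => simp [rowSpec, levAL]
  | cons y b' ih =>
      rw [rowSpec, List.range_succ_eq_map, List.map_cons, List.map_map, levAL_nil_left, ih]
      refine congrArg₂ _ (by simp) (List.map_congr_left ?_)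
      intro k _
      simp only [Function.comp, List.length_cons]
      push_cast
      ring

theorem row0_eq (b : List Char) :
    PySem.List.pyRange ((b.length : Int)) (-1) (-1) = rowSpec [] b := by
  rw [PySem.List.pyRange_neg_one, rowSpec_nil]
  have h : ((b.length : Int) - (-1)).toNat = b.length + 1 := by omega
  rw [h]

theorem foldl_stepB (a b : List Char) :
    a.reverse.foldl (fun row c => stepB c b row) (rowSpec [] b) = rowSpec a b := by
  induction a with
  | nil => rfl
  | cons x a' ih =>
      simp only [List.reverse_cons, List.foldl_append, List.foldl_cons, List.foldl_nil, ih,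
        stepB_rowSpec]

theorem editB_eq (w1 w2 : String) : editB w1 w2 = levAL w1.toList w2.toList := by
  simp only [editB, row0_eq, foldl_stepB, headD_rowSpec]

theorem lev_agree (w1 w2 : String) : LevA w1 w2 = editB w1 w2 := by
  rw [levA_eq, editB_eq]

-- ===== VERDICT (by name: the statement is the Claim_ definition above) =====
theorem getSortedEdges_spec : Claim_equal_getSortedEdges := by
  intro words _
  unfold Spec_getSortedEdges getSortedEdges getSortedEdges_alt
  simp only [PySem.List.foldl_append_singleton_eq_map, PySem.List.foldl_append_eq_flatMap,
    List.nil_append, lev_agree]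
  congr 1
  rcases Nat.eq_zero_or_pos words.length with hn | hn
  · rw [hn]
    norm_num [PySem.List.pyRange_one_eq_nil]
  · have h1 : (0:Int) ≤ (words.length : Int) - 1 := by omega
    have h2 : PySem.List.pyRange 0 (words.length : Int) =
        PySem.List.pyRange 0 ((words.length : Int) - 1) ++ [(words.length : Int) - 1] := by
      have := PySem.List.pyRange_one_succ_right (a := 0) (b := (words.length : Int) - 1) h1
      simpa using this
    rw [h2, List.flatMap_append]
    simp [PySem.List.pyRange_one_eq_nil]
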